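-- pv_equiv track=rewrite | github.com/TuringEnterprises/SWE-Bench-plus-plus | swebench/harness/run_evaluation.py | remove_git_apply_block
-- ===== SOURCE A (Python) =====
-- def remove_git_apply_block(script_content):
--     """
--     Removes 'git apply' blocks with heredoc syntax from a bash script using a line-by-line approach.
--     """
--     lines = script_content.splitlines(keepends=True)
--     result = []
--     in_heredoc = False
--     heredoc_end = None
--
--     for line in lines:
--         if not in_heredoc:
--             if line.startswith("git apply") and "<<" in line:
--                 # Extract heredoc delimiter, e.g., <<'EOF_abc123'
--                 start = line.find("<<'") + 3
--                 end = line.find("'", start)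
--                 heredoc_end = line[start:end]
--                 in_heredoc = True
--                 continue  # Skip this line (start of git apply)
--             else:
--                 result.append(line)
--         else:
--             # If we're in heredoc, skip lines until the ending marker is found
--             if line.strip() == heredoc_end:
--                 in_heredoc = False
--                 heredoc_end = None
--             # Else skip the line silently
--
--     return ''.join(result)
-- ===== SOURCE B (Python) =====
-- def remove_git_apply_block(script_content):
--     """Two-stage approach: first compute the half-open line-index ranges
--     occupied by git-apply heredoc blocks, then splice together the kept
--     segments between those ranges (instead of a one-pass state machine)."""
--     lines = script_content.splitlines(keepends=True)
--     n = len(lines)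
--     # stage 1: collect block ranges
--     blocks = []
--     i = 0
--     while i < n:
--         line = lines[i]
--         if line.startswith("git apply") and "<<" in line:
--             start = line.find("<<'") + 3
--             end = line.find("'", start)
--             delim = line[start:end]
--             j = i + 1
--             while j < n and lines[j].strip() != delim:
--                 j += 1
--             stop = j + 1 if j < n else n
--             blocks.append((i, stop))
--             i = stop
--         else:
--             i += 1
--     # stage 2: splice the kept segments around the block ranges
--     pieces = []
--     prev = 0
--     for a, b in blocks:
--         pieces.extend(lines[prev:a])
--         prev = b
--     pieces.extend(lines[prev:])
--     return ''.join(pieces)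
-- ===== Notes on version B (the rewrite author's own statement) =====
-- stated objective: alternative
-- what changed: Replaces A's single pass carrying an in_heredoc flag and appending line by line with a two-stage computation: first collect the half-open line-index ranges of the git-apply heredoc blocks, then splice together the kept segments between those ranges.
import Mathlib
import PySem

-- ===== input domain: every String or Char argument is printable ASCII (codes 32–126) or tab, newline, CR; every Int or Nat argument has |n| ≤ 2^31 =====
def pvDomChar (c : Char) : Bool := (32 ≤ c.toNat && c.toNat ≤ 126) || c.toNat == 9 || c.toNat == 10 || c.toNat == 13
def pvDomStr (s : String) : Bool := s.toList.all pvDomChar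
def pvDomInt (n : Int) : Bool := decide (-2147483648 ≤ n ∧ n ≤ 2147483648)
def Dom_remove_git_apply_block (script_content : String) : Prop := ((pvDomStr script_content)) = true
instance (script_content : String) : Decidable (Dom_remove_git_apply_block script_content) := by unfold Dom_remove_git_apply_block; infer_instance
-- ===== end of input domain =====

-- B replaces A's one-pass in_heredoc state machine by two stages: compute the heredoc block
-- line-index ranges first, then splice the kept segments (objective: alternative decomposition).

-- shared helper: Python's str.splitlines(keepends=True), hand-ported (PySem has only the
-- keepends=False form). Exact for line breaks '\n', '\r\n', '\r' — the only line breaks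
-- occurring in the printable-ASCII+tab/newline/CR domain.
def pvSplitKeep (cur : List Char) : List Char → List (List Char)
  | [] => if cur = [] then [] else [cur.reverse]
  | '\n' :: rest => (cur.reverse ++ ['\n']) :: pvSplitKeep [] rest
  | '\r' :: '\n' :: rest => (cur.reverse ++ ['\r', '\n']) :: pvSplitKeep [] rest
  | '\r' :: rest => (cur.reverse ++ ['\r']) :: pvSplitKeep [] rest
  | c :: rest => pvSplitKeep (c :: cur) rest

-- shared helper: line.startswith("git apply") and "<<" in line (both Pythons test this)
def pvHeader (line : List Char) : Bool :=
  PySem.Chars.startswith line "git apply".toList && PySem.Chars.isIn "<<".toList line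

-- shared helper: the delimiter extraction both Pythons perform line for line:
-- start = line.find("<<'") + 3; end = line.find("'", start); line[start:end]
def pvDelim (line : List Char) : List Char :=
  let start := PySem.Chars.find line "<<'".toList + 3
  let stop := PySem.Chars.findFrom line ['\''] start
  PySem.Chars.slice line (some start) (some stop)

-- ===== PORT A =====
-- A's loop state: (result, in_heredoc, heredoc_end)
def pvAStep (st : List (List Char) × Bool × Option (List Char)) (line : List Char) :
    List (List Char) × Bool × Option (List Char) :=
  if st.2.1 = false then
    if pvHeader line then (st.1, true, some (pvDelim line))
    else (st.1 ++ [line], false, st.2.2)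
  else
    if some (PySem.Chars.strip line) = st.2.2 then (st.1, false, none) else st

def remove_git_apply_block (script_content : String) : String :=
  let lines := pvSplitKeep [] script_content.toList
  String.ofList (PySem.Chars.join [] (lines.foldl pvAStep ([], false, none)).1)

-- ===== PORT B =====
-- B stage 1, inner scan: index just past the terminator line; n if unterminated.
-- 'suffix' is all.drop j, carried so the scan is structural recursion.
def pvFindEnd (delim : List Char) (j : Nat) : List (List Char) → Nat
  | [] => j
  | l :: rest => if PySem.Chars.strip l = delim then j + 1 else pvFindEnd delim (j + 1) rest

theorem pvFindEnd_ge (delim : List Char) (ls : List (List Char)) :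
    ∀ j, j ≤ pvFindEnd delim j ls := by
  induction ls with
  | nil => intro j; simp [pvFindEnd]
  | cons l rest ih =>
      intro j; simp only [pvFindEnd]; split
      · omega
      · exact le_trans (Nat.le_succ j) (ih (j + 1))

-- B stage 1: the half-open line-index ranges occupied by git-apply heredoc blocks
def pvBlocks (all : List (List Char)) (i : Nat) : List (Nat × Nat) :=
  if h : i < all.length then
    if pvHeader all[i] then
      (i, pvFindEnd (pvDelim all[i]) (i + 1) (all.drop (i + 1))) ::
        pvBlocks all (pvFindEnd (pvDelim all[i]) (i + 1) (all.drop (i + 1)))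
    else pvBlocks all (i + 1)
  else []
termination_by all.length - i
decreasing_by
  · have := pvFindEnd_ge (pvDelim all[i]) (all.drop (i + 1)) (i + 1)
    omega
  · omega

-- B stage 2: splice the kept segments between the ranges (the lines[prev:a] pieces)
def pvSplice (all : List (List Char)) : List (Nat × Nat) → Nat → List (List Char)
  | [], prev => all.drop prev
  | (a, b) :: bs, prev => (all.drop prev).take (a - prev) ++ pvSplice all bs b

def remove_git_apply_block_alt (script_content : String) : String :=
  let lines := pvSplitKeep [] script_content.toList
  String.ofList (PySem.Chars.join [] (pvSplice lines (pvBlocks lines 0) 0))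

-- ===== PRECONDITION & SPEC =====
def Spec_remove_git_apply_block (script_content : String) (out : String) : Prop := out = remove_git_apply_block_alt script_content
instance (script_content : String) (out : String) : Decidable (Spec_remove_git_apply_block script_content out) := by unfold Spec_remove_git_apply_block; infer_instance

-- ===== CLAIM (what is proved, stated in full; the proofs are below) =====
def Claim_equal_remove_git_apply_block : Prop := ∀ (script_content : String), Dom_remove_git_apply_block script_content → Spec_remove_git_apply_block script_content (remove_git_apply_block script_content)

-- ===== LEMMAS AND PROOFS =====

-- a suffix's tail is the next suffix
theorem pvDropSucc (all : List (List Char)) (j : Nat) (l : List Char) (rest : List (List Char))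
    (h : all.drop j = l :: rest) : all.drop (j + 1) = rest := by
  have h2 := congrArg List.tail h
  rwa [List.tail_drop] at h2

-- skipping a heredoc body: A's in-heredoc fold over the suffix at j lands, with the same
-- accumulator, outside the heredoc at the index pvFindEnd computes
theorem pvSkip_to_findEnd (d : List Char) (all : List (List Char)) :
    ∀ (ls : List (List Char)) (j : Nat), all.drop j = ls → ∀ acc,
    (ls.foldl pvAStep (acc, true, some d)).1 =
      ((all.drop (pvFindEnd d j ls)).foldl pvAStep (acc, false, none)).1 := by
  intro ls
  induction ls with
  | nil => intro j h acc; simp [pvFindEnd, h]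
  | cons l rest ih =>
      intro j h acc
      have hrest : all.drop (j + 1) = rest := pvDropSucc all j l rest h
      by_cases hd : PySem.Chars.strip l = d
      · simp [pvAStep, pvFindEnd, hd, hrest]
      · simp only [List.foldl_cons, pvAStep, pvFindEnd, if_neg hd,
          if_neg (show ¬ (some (PySem.Chars.strip l) = some d) by simp [hd]),
          if_neg (show ¬ (true = false) by simp)]
        exact ih (j + 1) hrest acc

-- the heads of pvBlocks start at or after i (fuel form for the descending induction)
theorem pvBlocks_ge_fuel (all : List (List Char)) :
    ∀ (k i : Nat), all.length - i ≤ k → ∀ p ∈ pvBlocks all i, i ≤ p.1 := by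
  intro k
  induction k with
  | zero =>
      intro i hk p hp
      rw [pvBlocks, dif_neg (by omega)] at hp
      exact absurd hp (List.not_mem_nil)
  | succ k ih =>
      intro i hk p hp
      by_cases hi : i < all.length
      · rw [pvBlocks, dif_pos hi] at hp
        by_cases hh : pvHeader all[i] = true
        · rw [if_pos hh] at hp
          rcases List.mem_cons.mp hp with h1 | h1
          · subst h1; exact le_refl i
          · have hge := pvFindEnd_ge (pvDelim all[i]) (all.drop (i + 1)) (i + 1)
            have := ih _ (by omega) p h1
            omega
        · rw [if_neg hh] at hp
          have := ih (i + 1) (by omega) p hp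
          omega
      · rw [pvBlocks, dif_neg hi] at hp
        exact absurd hp (List.not_mem_nil)

theorem pvBlocks_ge (all : List (List Char)) : ∀ i, ∀ p ∈ pvBlocks all i, i ≤ p.1 :=
  fun i => pvBlocks_ge_fuel all (all.length - i) i (le_refl _)

-- shifting the splice start past a kept line
theorem pvSplice_shift (all : List (List Char)) (i : Nat) (hi : i < all.length)
    (bs : List (Nat × Nat)) (hbs : ∀ p ∈ bs, i + 1 ≤ p.1) :
    pvSplice all bs i = all[i] :: pvSplice all bs (i + 1) := by
  cases bs with
  | nil => simp only [pvSplice]; exact List.drop_eq_getElem_cons hi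
  | cons p rest =>
      obtain ⟨a, b⟩ := p
      have ha : i + 1 ≤ a := hbs (a, b) (List.mem_cons_self)
      simp only [pvSplice]
      rw [List.drop_eq_getElem_cons hi]
      have hsub : a - i = (a - (i + 1)) + 1 := by omega
      rw [hsub, List.take_succ_cons, List.cons_append]

-- main invariant (fuel form): A's fold over the suffix at i, outside a heredoc, appends
-- exactly the spliced kept segments from i
theorem pvMain_fuel (all : List (List Char)) :
    ∀ (k i : Nat), all.length - i ≤ k → ∀ acc,
    ((all.drop i).foldl pvAStep (acc, false, none)).1 =
      acc ++ pvSplice all (pvBlocks all i) i := by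
  intro k
  induction k with
  | zero =>
      intro i hk acc
      have hge : all.length ≤ i := by omega
      rw [pvBlocks, dif_neg (by omega)]
      simp [pvSplice, List.drop_eq_nil_of_le hge]
  | succ k ih =>
      intro i hk acc
      by_cases hi : i < all.length
      · rw [List.drop_eq_getElem_cons hi, List.foldl_cons, pvBlocks, dif_pos hi]
        by_cases hh : pvHeader all[i] = true
        · rw [if_pos hh]
          have hstep : pvAStep (acc, false, none) all[i] =
              (acc, true, some (pvDelim all[i])) := by simp [pvAStep, hh]
          rw [hstep]
          have hge := pvFindEnd_ge (pvDelim all[i]) (all.drop (i + 1)) (i + 1)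
          rw [pvSkip_to_findEnd (pvDelim all[i]) all (all.drop (i + 1)) (i + 1) rfl acc]
          rw [ih (pvFindEnd (pvDelim all[i]) (i + 1) (all.drop (i + 1))) (by omega) acc]
          simp [pvSplice]
        · rw [if_neg hh]
          have hstep : pvAStep (acc, false, none) all[i] =
              (acc ++ [all[i]], false, none) := by simp [pvAStep, hh]
          rw [hstep, ih (i + 1) (by omega) (acc ++ [all[i]])]
          rw [pvSplice_shift all i hi _ (pvBlocks_ge all (i + 1))]
          simp
      · have hge : all.length ≤ i := by omega
        rw [pvBlocks, dif_neg (by omega)]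
        simp [pvSplice, List.drop_eq_nil_of_le hge]

theorem pvMain (all : List (List Char)) :
    ∀ i acc, ((all.drop i).foldl pvAStep (acc, false, none)).1 =
      acc ++ pvSplice all (pvBlocks all i) i :=
  fun i => pvMain_fuel all (all.length - i) i (le_refl _)

-- ===== VERDICT (by name: the statement is the Claim_ definition above) =====
theorem remove_git_apply_block_spec : Claim_equal_remove_git_apply_block := by
  intro s _
  unfold Spec_remove_git_apply_block remove_git_apply_block remove_git_apply_block_alt
  have h := pvMain (pvSplitKeep [] s.toList) 0 []
  simp only [List.drop_zero, List.nil_append] at h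
  exact congrArg (fun l => String.ofList (PySem.Chars.join [] l)) h
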